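-- pv_equiv track=rewrite | github.com/510YilinWu/honours-code | run.py | extract_subjects_and_variables
-- ===== SOURCE A (Python) =====
-- def extract_subjects_and_variables(extracted_header):
--     """
--     Extracts subjects and variables from the extracted headers.
--     Args:
--         extracted_header (dict): A dictionary where each key is a search term and the value is a list of header rows found after the search term.
--     Returns:
--         dict: A dictionary where each key is a search term and the value is a tuple containing the subject and a list of unique variables.
--     """
--     subjects_and_variables = {term: (None, []) for term in extracted_header}
--     for term, headers in extracted_header.items():
--         for header in headers:
--             for item in header:
--                 if ':' in item:
--                     subject, variable = item.split(':', 1)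
--                     variable = variable.strip('| ')  # Remove leading/trailing '| ' for Trajectories
--                     if subjects_and_variables[term][0] is None:
--                         subjects_and_variables[term] = (subject, [variable])
--                     else:
--                         if variable not in subjects_and_variables[term][1]:
--                             subjects_and_variables[term][1].append(variable)
--     return subjects_and_variables
-- ===== SOURCE B (Python) =====
-- def _term_summary(headers):
--     """Summarize one term's rows: subject of the first ':' item, and the distinct
--     stripped variables ordered by first occurrence via set + sort-by-first-index."""
--     items = [item for header in headers for item in header]
--     pairs = [item.split(':', 1) for item in items if ':' in item]
--     if not pairs:
--         return (None, [])
--     vs = [v.strip('| ') for _, v in pairs]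
--     return (pairs[0][0], sorted(set(vs), key=vs.index))
--
-- def extract_subjects_and_variables(extracted_header):
--     return {term: _term_summary(headers) for term, headers in extracted_header.items()}
-- ===== Notes on version B (the rewrite author's own statement) =====
-- stated objective: alternative
-- what changed: Replaces A's single interleaved stateful pass (mutating a shared result dict item by item, appending each unseen variable) with a per-term helper that flattens and parses all pairs first, then obtains the ordered-unique variables by a different mechanism: set(vs) followed by sorting the distinct values by their first index (sorted(set(vs), key=vs.index)) instead of scan-and-append dedup.
import Mathlib
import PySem

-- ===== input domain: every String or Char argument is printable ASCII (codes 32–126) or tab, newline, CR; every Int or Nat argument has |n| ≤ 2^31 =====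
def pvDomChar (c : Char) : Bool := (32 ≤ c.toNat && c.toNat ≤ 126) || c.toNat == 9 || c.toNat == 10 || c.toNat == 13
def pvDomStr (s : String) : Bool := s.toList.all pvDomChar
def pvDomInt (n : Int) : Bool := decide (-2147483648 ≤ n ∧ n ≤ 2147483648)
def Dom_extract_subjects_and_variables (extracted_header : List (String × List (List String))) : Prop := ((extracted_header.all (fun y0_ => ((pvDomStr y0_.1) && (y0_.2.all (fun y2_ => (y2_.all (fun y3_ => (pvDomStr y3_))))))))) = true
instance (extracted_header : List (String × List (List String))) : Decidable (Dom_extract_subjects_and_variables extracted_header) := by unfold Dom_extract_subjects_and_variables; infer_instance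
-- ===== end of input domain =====

-- B replaces A's interleaved stateful pass with a per-term parse-then-reduce whose ordered
-- dedup is computed as sorted(set(vs), key=vs.index); equivalence is about the RETURN value.

-- ===== PORT A =====
-- loop body of A's innermost 'for item in header' (the dict entry for term is always
-- present, so 'getD' with a default is exact; item.split(':', 1) has exactly two parts
-- because ':' is in item, so the two getD projections are exact for the destructuring)
def pvBodyA (term : String) (d : PySem.Dict String (Option String × List String))
    (item : String) : PySem.Dict String (Option String × List String) :=
  if PySem.Str.isIn ":" item then
    let parts := (PySem.Str.splitMax? item ":" 1).getD []
    let subject := parts.getD 0 ""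
    let variab := PySem.Str.stripChars (parts.getD 1 "") "| "
    let cur := d.getD term (none, [])
    match cur.1 with
    | none => d.insert term (some subject, [variab])
    | some _ =>
      if variab ∈ cur.2 then d
      else d.insert term (cur.1, cur.2 ++ [variab])
  else d

def extract_subjects_and_variables (extracted_header : List (String × List (List String))) : List (String × Option String × List String) :=
  let init : PySem.Dict String (Option String × List String) :=
    extracted_header.foldl (fun d p => d.insert p.1 (none, [])) PySem.Dict.empty
  (extracted_header.foldl (fun d p =>
    p.2.foldl (fun d header => header.foldl (pvBodyA p.1) d) d) init).items

-- ===== PORT B =====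
-- item.split(':', 1) when ':' in item: the (subject, raw-variable) pair
def pvParseItem (item : String) : Option (String × String) :=
  if PySem.Str.isIn ":" item then
    let parts := (PySem.Str.splitMax? item ":" 1).getD []
    some (parts.getD 0 "", parts.getD 1 "")
  else none

-- Source B's _term_summary: flatten, parse, then sorted(set(vs), key=vs.index).
-- (sorted over the Python set is exact here: the keys vs.index(v) are pairwise distinct
-- on the distinct values, so the sort's outcome does not depend on the set's hash order.)
def pvTermSummary (headers : List (List String)) : Option String × List String :=
  let items := headers.flatMap (fun header => header)
  let pairs := items.filterMap pvParseItem
  match pairs with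
  | [] => (none, [])
  | q :: rest =>
    let vs := (q :: rest).map (fun r => PySem.Str.stripChars r.2 "| ")
    (some q.1, PySem.List.sorted (PySem.Set.ofList vs)
      (fun v => (PySem.List.index? vs v).getD 0) false)

def extract_subjects_and_variables_alt (extracted_header : List (String × List (List String))) : List (String × Option String × List String) :=
  extracted_header.map (fun p => (p.1, pvTermSummary p.2))

-- ===== PRECONDITION & SPEC =====
-- Pre_ requires pairwise-distinct keys: the Python argument is a dict, so an association
-- list with a duplicated key corresponds to no Python input at all (it excludes nothing
-- A actually returns on).
def Pre_extract_subjects_and_variables (extracted_header : List (String × List (List String))) : Prop :=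
  (extracted_header.map Prod.fst).Nodup
instance (extracted_header : List (String × List (List String))) : Decidable (Pre_extract_subjects_and_variables extracted_header) := by unfold Pre_extract_subjects_and_variables; infer_instance
def pvWitness_extract_subjects_and_variables : (List (String × List (List String))) :=
  [("traj", [["Sub1:x | ", "noise", "Sub1:y"], ["Sub2:x"]]), ("empty", [])]
def Spec_extract_subjects_and_variables (extracted_header : List (String × List (List String))) (out : List (String × Option String × List String)) : Prop := out = extract_subjects_and_variables_alt extracted_header
instance (extracted_header : List (String × List (List String))) (out : List (String × Option String × List String)) : Decidable (Spec_extract_subjects_and_variables extracted_header out) := by unfold Spec_extract_subjects_and_variables; infer_instance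

-- ===== CLAIM (what is proved, stated in full; the proofs are below) =====
def Claim_equal_extract_subjects_and_variables : Prop := ∀ (extracted_header : List (String × List (List String))), Dom_extract_subjects_and_variables extracted_header → Pre_extract_subjects_and_variables extracted_header → Spec_extract_subjects_and_variables extracted_header (extract_subjects_and_variables extracted_header)

-- ===== LEMMAS AND PROOFS =====

-- value-level version of A's inner loop body (the state of one term's entry)
def pvStepS (st : Option String × List String) (item : String) : Option String × List String :=
  match pvParseItem item with
  | none => st
  | some (s, v0) =>
    let v := PySem.Str.stripChars v0 "| "
    match st.1 with
    | none => (some s, [v])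
    | some _ => if v ∈ st.2 then st else (st.1, st.2 ++ [v])

theorem pv_get?_mk_append {V : Type} (L1 L2 : List (String × V)) (k : String) (w : V)
    (h : k ∉ L1.map Prod.fst) :
    (PySem.Dict.mk (L1 ++ (k, w) :: L2)).get? k = some w := by
  induction L1 with
  | nil => simp [PySem.Dict.get?_mk_cons]
  | cons p t ih =>
    obtain ⟨pk, pv⟩ := p
    simp only [List.map_cons, List.mem_cons, not_or] at h
    rw [List.cons_append, PySem.Dict.get?_mk_cons]
    simp [beq_eq_false_iff_ne.2 (Ne.symm h.1), ih h.2]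

theorem pv_insert_mk_append {V : Type} (L1 L2 : List (String × V)) (k : String) (w v : V)
    (h1 : k ∉ L1.map Prod.fst) (h2 : k ∉ L2.map Prod.fst) :
    (PySem.Dict.mk (L1 ++ (k, w) :: L2)).insert k v = PySem.Dict.mk (L1 ++ (k, v) :: L2) := by
  have hc : (PySem.Dict.mk (L1 ++ (k, w) :: L2)).contains k = true := by
    rw [PySem.Dict.contains_eq_isSome_get?, pv_get?_mk_append L1 L2 k w h1]; rfl
  apply PySem.Dict.ext
  rw [PySem.Dict.items_insert_of_contains _ v hc]
  show (L1 ++ (k, w) :: L2).map (fun p => if (p.1 == k) = true then (k, v) else p) = L1 ++ (k, v) :: L2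
  have hid : ∀ (L : List (String × V)), k ∉ L.map Prod.fst →
      L.map (fun p => if (p.1 == k) = true then (k, v) else p) = L := by
    intro L hL
    rw [List.map_congr_left (g := id), List.map_id]
    intro p hp
    have hne : p.1 ≠ k := fun e => hL (e ▸ List.mem_map_of_mem hp)
    simp [beq_eq_false_iff_ne.2 hne]
  rw [List.map_append, List.map_cons, hid L1 h1, hid L2 h2]
  simp

theorem pv_fold_items (term : String) (done rest : List (String × (Option String × List String)))
    (h1 : term ∉ done.map Prod.fst) (h2 : term ∉ rest.map Prod.fst) :
    ∀ (items : List String) (w : Option String × List String),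
      items.foldl (pvBodyA term) (PySem.Dict.mk (done ++ (term, w) :: rest)) =
        PySem.Dict.mk (done ++ (term, items.foldl pvStepS w) :: rest) := by
  intro items
  induction items with
  | nil => intro w; rfl
  | cons item items ih =>
    intro w
    obtain ⟨w1, w2⟩ := w
    have hget : (PySem.Dict.mk (done ++ (term, (w1, w2)) :: rest)).getD term (none, []) = (w1, w2) := by
      rw [PySem.Dict.getD_eq_get?_getD, pv_get?_mk_append done rest term _ h1]; rfl
    have hbody : pvBodyA term (PySem.Dict.mk (done ++ (term, (w1, w2)) :: rest)) item =
        PySem.Dict.mk (done ++ (term, pvStepS (w1, w2) item) :: rest) := by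
      by_cases hin : PySem.Str.isIn ":" item = true
      · simp only [pvBodyA, pvStepS, pvParseItem, hin, if_true, hget]
        cases w1 with
        | none => exact pv_insert_mk_append done rest term _ _ h1 h2
        | some s =>
          by_cases hv : PySem.Str.stripChars
              ((PySem.Str.splitMax? item ":" 1).getD [] |>.getD 1 "") "| " ∈ w2
          · simp only [hv, if_true]
          · simp only [hv, if_false]
            exact pv_insert_mk_append done rest term _ _ h1 h2
      · simp only [pvBodyA, pvStepS, pvParseItem, if_neg hin]
    rw [List.foldl_cons, List.foldl_cons, hbody, ih]

theorem pv_main (l : List (String × List (List String)))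
    (done : List (String × (Option String × List String)))
    (h : (done.map Prod.fst ++ l.map Prod.fst).Nodup) :
    l.foldl (fun d p => p.2.foldl (fun d header => header.foldl (pvBodyA p.1) d) d)
        (PySem.Dict.mk (done ++ l.map (fun p => (p.1, ((none : Option String), ([] : List String)))))) =
      PySem.Dict.mk (done ++ l.map (fun p => (p.1, p.2.flatten.foldl pvStepS (none, [])))) := by
  induction l generalizing done with
  | nil => simp
  | cons p l ih =>
    have hnd : (done.map Prod.fst ++ (p.1 :: l.map Prod.fst)).Nodup := by simpa using h
    have h1 : p.1 ∉ done.map Prod.fst := by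
      intro hm
      exact (List.disjoint_of_nodup_append hnd) hm (List.mem_cons_self)
    have h2 : p.1 ∉ (l.map (fun p => (p.1, ((none : Option String), ([] : List String))))).map Prod.fst := by
      have := ((List.nodup_append.mp hnd).2.1)
      simp only [List.nodup_cons] at this
      simpa using this.1
    rw [List.foldl_cons, ← List.foldl_flatten, List.map_cons, pv_fold_items p.1 done _ h1 h2]
    have hrearr : done ++ (p.1, p.2.flatten.foldl pvStepS (none, [])) :: l.map (fun p => (p.1, ((none : Option String), ([] : List String)))) =
        (done ++ [(p.1, p.2.flatten.foldl pvStepS (none, []))]) ++ l.map (fun p => (p.1, ((none : Option String), ([] : List String)))) := by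
      simp
    rw [hrearr, ih]
    · simp
    · simp only [List.map_append, List.map_cons, List.map_nil, List.append_assoc, List.singleton_append]
      simpa using hnd

theorem pv_state_some (items : List String) :
    ∀ (s : String) (acc : List String),
      items.foldl pvStepS (some s, acc) =
        (some s, (items.filterMap pvParseItem).foldl
          (fun a q => PySem.Set.add a (PySem.Str.stripChars q.2 "| ")) acc) := by
  induction items with
  | nil => intro s acc; rfl
  | cons item items ih =>
    intro s acc
    rw [List.foldl_cons, List.filterMap_cons]
    cases hp : pvParseItem item with
    | none => simp only [pvStepS, hp]; exact ih s acc
    | some q =>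
      obtain ⟨q1, q2⟩ := q
      simp only [pvStepS, hp, List.foldl_cons]
      by_cases hv : PySem.Str.stripChars q2 "| " ∈ acc
      · rw [if_pos hv, ih]
        simp [PySem.Set.add, PySem.Set.contains_eq_listContains, hv]
      · rw [if_neg hv, ih]
        simp [PySem.Set.add, PySem.Set.contains_eq_listContains, hv]

theorem pv_state (items : List String) :
    items.foldl pvStepS ((none : Option String), ([] : List String)) =
      match items.filterMap pvParseItem with
      | [] => (none, [])
      | q :: rest => (some q.1, PySem.List.dedup ((q :: rest).map (fun r => PySem.Str.stripChars r.2 "| "))) := by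
  induction items with
  | nil => rfl
  | cons item items ih =>
    rw [List.foldl_cons, List.filterMap_cons]
    cases hp : pvParseItem item with
    | none => simpa only [pvStepS, hp] using ih
    | some q =>
      obtain ⟨q1, q2⟩ := q
      simp only [pvStepS, hp]
      rw [pv_state_some]
      simp only [PySem.List.dedup_eq_ofList, PySem.Set.ofList_eq_foldl, List.map_cons,
        List.foldl_cons, List.foldl_map]
      rfl

-- the distinct values in first-occurrence order are pairwise strictly increasing
-- under the first-index key
theorem pv_ofList_pairwise_index (vs : List String) :
    (PySem.Set.ofList vs).Pairwise
      (fun a b => ((PySem.List.index? vs a).getD 0) < ((PySem.List.index? vs b).getD 0)) := by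
  induction vs using List.reverseRecOn with
  | nil => simp [PySem.Set.ofList]
  | append_singleton t x ih =>
    rw [PySem.Set.ofList_append_singleton]
    by_cases hx : x ∈ t
    · have hadd : PySem.Set.add (PySem.Set.ofList t) x = PySem.Set.ofList t := by
        simp [PySem.Set.add, PySem.Set.contains_eq_listContains, PySem.Set.mem_ofList, hx]
      rw [hadd]
      refine ih.imp_of_mem ?_
      intro a b ha hb hlt
      have ha' : a ∈ t := (PySem.Set.mem_ofList _ _).1 ha
      have hb' : b ∈ t := (PySem.Set.mem_ofList _ _).1 hb
      rwa [PySem.List.index?_append_of_mem _ ha', PySem.List.index?_append_of_mem _ hb']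
    · have hadd : PySem.Set.add (PySem.Set.ofList t) x = PySem.Set.ofList t ++ [x] := by
        simp [PySem.Set.add, PySem.Set.contains_eq_listContains, PySem.Set.mem_ofList, hx]
      rw [hadd, List.pairwise_append]
      refine ⟨?_, by simp, ?_⟩
      · refine ih.imp_of_mem ?_
        intro a b ha hb hlt
        have ha' : a ∈ t := (PySem.Set.mem_ofList _ _).1 ha
        have hb' : b ∈ t := (PySem.Set.mem_ofList _ _).1 hb
        rwa [PySem.List.index?_append_of_mem _ ha', PySem.List.index?_append_of_mem _ hb']
      · intro a ha b hb
        have ha' : a ∈ t := (PySem.Set.mem_ofList _ _).1 ha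
        have hb' : b = x := by simpa using hb
        subst hb'
        rw [PySem.List.index?_append_of_mem _ ha', PySem.List.index?_append_singleton_self t _ hx]
        cases hk : PySem.List.index? t a with
        | none => exact absurd ha' ((PySem.List.index?_eq_none_iff _ _).1 hk)
        | some k =>
          obtain ⟨hklt, -, -⟩ := PySem.List.getElem_of_index?_eq_some hk
          simpa using hklt
  
-- B's sorted(set(vs), key=vs.index) IS the first-occurrence dedup
theorem pv_sorted_index (vs : List String) :
    PySem.List.sorted (PySem.Set.ofList vs)
        (fun v => (PySem.List.index? vs v).getD 0) false = PySem.List.dedup vs := by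
  rw [PySem.List.dedup_eq_ofList]
  exact PySem.List.sorted_eq_of_perm_of_pairwise_lt _ _ _ (List.Perm.refl _)
    (pv_ofList_pairwise_index vs)

-- ===== VERDICT (by name: the statement is the Claim_ definition above) =====
theorem extract_subjects_and_variables_spec : Claim_equal_extract_subjects_and_variables := by
  intro eh _ hpre
  unfold Spec_extract_subjects_and_variables extract_subjects_and_variables extract_subjects_and_variables_alt
  have hinit : eh.foldl (fun d p => d.insert p.1 ((none : Option String), ([] : List String)))
      PySem.Dict.empty = PySem.Dict.mk (eh.map fun p => (p.1, (none, []))) := by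
    apply PySem.Dict.ext
    rw [PySem.Dict.items_foldl_insert_fresh eh Prod.fst
      (fun _ => ((none : Option String), ([] : List String))) PySem.Dict.empty
      (fun a _ => PySem.Dict.contains_empty a.1) hpre]
    rfl
  rw [hinit]
  have hmain := pv_main eh [] (by simpa using hpre)
  simp only [List.nil_append] at hmain
  show (List.foldl (fun d p => List.foldl (fun d header => List.foldl (pvBodyA p.1) d header) d p.2)
      (PySem.Dict.mk (eh.map (fun p => (p.1, none, [])))) eh).items = _
  rw [hmain]
  show eh.map (fun p => (p.1, p.2.flatten.foldl pvStepS (none, []))) = _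
  apply List.map_congr_left
  intro p _
  have hts : pvTermSummary p.2 =
      match p.2.flatten.filterMap pvParseItem with
      | [] => (none, [])
      | q :: rest => (some q.1, PySem.List.dedup ((q :: rest).map (fun r => PySem.Str.stripChars r.2 "| "))) := by
    unfold pvTermSummary
    rw [show p.2.flatMap (fun header => header) = p.2.flatten from by simp [List.flatMap_id']]
    cases h : p.2.flatten.filterMap pvParseItem with
    | nil => simp only [h]
    | cons q rest => simp only [h, pv_sorted_index]
  rw [pv_state, hts]
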